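-- pv_equiv track=rewrite | github.com/jheikkila42/sea_watch | sea_watch_10.py | get_work_ranges
-- ===== SOURCE A (Python) =====
-- def slot_to_time_str(slot):
--     """Muuntaa slotin ajaksi."""
--     h = slot // 2
--     m = "30" if slot % 2 else "00"
--     return f"{h:02d}:{m}"
--
-- def get_work_ranges(work_slots):
--     """Palauttaa työjaksot luettavassa muodossa."""
--     ranges = []
--     start = None
--     for i, w in enumerate(work_slots):
--         if w and start is None:
--             start = i
--         elif not w and start is not None:
--             ranges.append(f"{slot_to_time_str(start)}-{slot_to_time_str(i)}")
--             start = None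
--     if start is not None:
--         ranges.append(f"{slot_to_time_str(start)}-00:00")
--     return ranges
-- ===== SOURCE B (Python) =====
-- def slot_to_time_str(slot):
--     """Muuntaa slotin ajaksi."""
--     h = slot // 2
--     m = "30" if slot % 2 else "00"
--     return f"{h:02d}:{m}"
--
-- def get_work_ranges(work_slots):
--     """Palauttaa tyojaksot luettavassa muodossa: run-scan over maximal runs."""
--     n = len(work_slots)
--     ranges = []
--     i = 0
--     while i < n:
--         j = i + 1
--         while j < n and bool(work_slots[j]) == bool(work_slots[i]):
--             j += 1
--         if work_slots[i]:
--             end = "00:00" if j == n else slot_to_time_str(j)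
--             ranges.append(f"{slot_to_time_str(i)}-{end}")
--         i = j
--     return ranges
-- ===== Notes on version B (the rewrite author's own statement) =====
-- stated objective: alternative
-- what changed: B replaces A's per-element transition state machine (Optional start flag updated element by element) with a two-pointer scan that jumps over each maximal run of equal truthiness at once and emits a range per truthy run.
import Mathlib
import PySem

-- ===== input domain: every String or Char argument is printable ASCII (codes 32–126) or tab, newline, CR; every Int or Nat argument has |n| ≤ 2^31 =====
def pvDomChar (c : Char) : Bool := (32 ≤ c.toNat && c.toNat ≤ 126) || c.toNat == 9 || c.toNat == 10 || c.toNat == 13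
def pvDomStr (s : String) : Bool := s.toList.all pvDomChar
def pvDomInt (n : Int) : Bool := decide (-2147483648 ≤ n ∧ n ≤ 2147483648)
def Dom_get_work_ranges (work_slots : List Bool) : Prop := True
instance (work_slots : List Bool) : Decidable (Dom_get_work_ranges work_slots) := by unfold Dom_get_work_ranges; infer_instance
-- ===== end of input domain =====

-- B is an alternative decomposition: a two-pointer scan over maximal runs instead of
-- A's per-element state machine with an Optional start flag.

-- shared helper: both Pythons define the identical slot_to_time_str
-- (slot is a list index, hence a Nat; f"{h:02d}" = zero-pad to 2 digits, exact for h ≥ 0)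
def slot_to_time_str (slot : Nat) : String :=
  let h := slot / 2
  let m := if slot % 2 = 1 then "30" else "00"
  (if h < 10 then "0" ++ toString h else toString h) ++ ":" ++ m

-- ===== PORT A =====
-- the for-loop as structural recursion over the same state (index i, start, ranges);
-- the base case is the post-loop `if start is not None` append
def aGo : List Bool → Nat → Option Nat → List String → List String
  | [], _, start, ranges =>
    match start with
    | some s => ranges ++ [slot_to_time_str s ++ "-00:00"]
    | none => ranges
  | w :: rest, i, start, ranges =>
    match start with
    | none =>
      if w then aGo rest (i + 1) (some i) ranges
      else aGo rest (i + 1) none ranges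
    | some s =>
      if w then aGo rest (i + 1) (some s) ranges
      else aGo rest (i + 1) none
             (ranges ++ [slot_to_time_str s ++ "-" ++ slot_to_time_str i])

def get_work_ranges (work_slots : List Bool) : List String :=
  aGo work_slots 0 none []

-- ===== PORT B =====
-- length of the leading run of elements equal to b (B's inner `while` loop)
def runLen (b : Bool) : List Bool → Nat
  | [] => 0
  | x :: xs => if x == b then runLen b xs + 1 else 0

-- B's outer `while i < n` loop: at each step jump over one maximal run (j = i + t + 1)
def bGo (n : Nat) : List Bool → Nat → List String
  | [], _ => []
  | x :: xs, i =>
    let t := runLen x xs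
    let j := i + t + 1
    let rest := bGo n (xs.drop t) j
    if x then
      (slot_to_time_str i ++ "-" ++ (if j = n then "00:00" else slot_to_time_str j)) :: rest
    else rest
termination_by l => l.length
decreasing_by simp [List.length_drop]

def get_work_ranges_alt (work_slots : List Bool) : List String :=
  bGo work_slots.length work_slots 0

-- ===== PRECONDITION & SPEC =====
def Spec_get_work_ranges (work_slots : List Bool) (out : List String) : Prop := out = get_work_ranges_alt work_slots
instance (work_slots : List Bool) (out : List String) : Decidable (Spec_get_work_ranges work_slots out) := by unfold Spec_get_work_ranges; infer_instance

-- ===== CLAIM (what is proved, stated in full; the proofs are below) =====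
def Claim_equal_get_work_ranges : Prop := ∀ (work_slots : List Bool), Dom_get_work_ranges work_slots → Spec_get_work_ranges work_slots (get_work_ranges work_slots)

-- ===== LEMMAS AND PROOFS =====

theorem append_dash (s : String) : s ++ "-" ++ "00:00" = s ++ "-00:00" := by
  rw [String.append_assoc]
  have : ("-" ++ "00:00" : String) = "-00:00" := by decide
  rw [this]

theorem aGo_acc (l : List Bool) : ∀ (i : Nat) (st : Option Nat) (acc : List String),
    aGo l i st acc = acc ++ aGo l i st [] := by
  induction l with
  | nil => intro i st acc; cases st <;> simp [aGo]
  | cons w rest ih =>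
    intro i st acc
    cases st with
    | none =>
      cases w
      · simp only [aGo, Bool.false_eq_true, if_false]; exact ih _ _ _
      · simp only [aGo, if_true]; exact ih _ _ _
    | some s =>
      cases w
      · simp only [aGo, Bool.false_eq_true, if_false]
        rw [ih (i+1) none (acc ++ [slot_to_time_str s ++ "-" ++ slot_to_time_str i]),
            ih (i+1) none ([] ++ [slot_to_time_str s ++ "-" ++ slot_to_time_str i])]
        simp
      · simp only [aGo, if_true]; exact ih _ _ _

theorem runLen_le (b : Bool) (l : List Bool) : runLen b l ≤ l.length := by
  induction l with
  | nil => simp [runLen]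
  | cons x xs ih =>
    by_cases h : x == b
    · simp only [runLen, if_pos h, List.length_cons]; omega
    · simp only [runLen, if_neg h, List.length_cons]; omega

theorem drop_runLen (b : Bool) : ∀ (l : List Bool), runLen b l < l.length →
    l.drop (runLen b l) = (!b) :: l.drop (runLen b l + 1) := by
  intro l
  induction l with
  | nil => simp
  | cons x xs ih =>
    intro h
    by_cases hx : x == b
    · simp only [runLen, if_pos hx, List.length_cons] at h ⊢
      simp only [List.drop_succ_cons]
      exact ih (by omega)
    · have hb : x = !b := by cases x <;> cases b <;> simp_all
      simp [runLen, hb]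

-- bGo skips a falsy run one element at a time equals skipping it wholesale
theorem bGo_false (n : Nat) (ys : List Bool) (p : Nat) :
    bGo n (false :: ys) p = bGo n ys (p + 1) := by
  cases ys with
  | nil => simp [bGo, runLen]
  | cons y ys' =>
    cases y with
    | true => simp [bGo, runLen]
    | false =>
      simp only [bGo, runLen]
      simp only [show ((false : Bool) == false) = true from rfl, if_true,
        Bool.false_eq_true, if_false, List.drop_succ_cons]
      have : p + (runLen false ys' + 1) + 1 = p + 1 + runLen false ys' + 1 := by omega
      rw [this]

-- the state machine while start = some s emits one range for the current truthy run
theorem aGo_some (xs : List Bool) : ∀ (i s : Nat),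
    aGo xs i (some s) [] =
      (slot_to_time_str s ++ "-" ++
        (if runLen true xs = xs.length then "00:00"
         else slot_to_time_str (i + runLen true xs))) ::
      (if runLen true xs = xs.length then []
       else aGo (xs.drop (runLen true xs + 1)) (i + runLen true xs + 1) none []) := by
  induction xs with
  | nil =>
    intro i s
    simp [aGo, runLen, append_dash]
  | cons x r ih =>
    intro i s
    cases x with
    | false =>
      have hlen : ¬ (runLen true (false :: r) = (false :: r).length) := by
        simp [runLen]
      simp only [aGo, Bool.false_eq_true, if_false]
      rw [aGo_acc]
      simp only [runLen, show ((false : Bool) == true) = false from rfl,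
        Bool.false_eq_true, if_false, if_neg hlen]
      simp
    | true =>
      have h1 : runLen true (true :: r) = runLen true r + 1 := by simp [runLen]
      simp only [aGo, if_pos rfl]
      rw [ih (i + 1) s]
      by_cases hc : runLen true r = r.length
      · have hc2 : runLen true (true :: r) = (true :: r).length := by
          simp [h1, hc]
        simp [hc, hc2]
      · have hc2 : ¬ (runLen true (true :: r) = (true :: r).length) := by
          simp [h1]; omega
        simp only [h1, List.drop_succ_cons] at hc2 ⊢
        simp [hc2, Nat.add_assoc, Nat.add_comm, Nat.add_left_comm]

-- main invariant (fuel = length bound): A's loop from a clean state computes B's run scan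
theorem aGo_none_fuel (fuel : Nat) : ∀ (l : List Bool), l.length ≤ fuel → ∀ (i : Nat),
    aGo l i none [] = bGo (i + l.length) l i := by
  induction fuel with
  | zero =>
    intro l hl i
    have : l = [] := List.eq_nil_of_length_eq_zero (by omega)
    subst this; simp [aGo, bGo]
  | succ f ih =>
    intro l hl i
    cases l with
    | nil => simp [aGo, bGo]
    | cons x xs =>
      cases x with
      | false =>
        simp only [aGo, Bool.false_eq_true, if_false]
        rw [ih xs (by simp at hl; omega) (i + 1), bGo_false]
        congr 1
        simp [List.length_cons]; omega
      | true =>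
        simp only [aGo, if_pos rfl]
        rw [aGo_some xs (i + 1) i]
        simp only [bGo, List.length_cons]
        by_cases hc : runLen true xs = xs.length
        · have hdrop : xs.drop (runLen true xs) = [] := by rw [hc]; simp
          have hn : i + runLen true xs + 1 = i + (xs.length + 1) := by omega
          rw [hdrop]
          simp only [bGo, if_pos hn, hc]
          simp
          intro h
          exact absurd (by omega : i + xs.length + 1 = i + (xs.length + 1)) h
        · have hlt : runLen true xs < xs.length :=
            lt_of_le_of_ne (runLen_le true xs) hc
          have hdrop := drop_runLen true xs hlt
          simp only [Bool.not_true] at hdrop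
          have hn : ¬ (i + runLen true xs + 1 = i + (xs.length + 1)) := by omega
          have hrec : aGo (xs.drop (runLen true xs + 1)) (i + runLen true xs + 1 + 1) none []
              = bGo (i + (xs.length + 1)) (xs.drop (runLen true xs + 1))
                  (i + runLen true xs + 1 + 1) := by
            rw [ih (xs.drop (runLen true xs + 1))
                  (by simp [List.length_drop] at hl ⊢; omega)
                  (i + runLen true xs + 1 + 1)]
            congr 1
            simp [List.length_drop]
            omega
          have htail : bGo (i + (xs.length + 1)) (xs.drop (runLen true xs))
              (i + runLen true xs + 1)
              = bGo (i + (xs.length + 1)) (xs.drop (runLen true xs + 1))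
                  (i + runLen true xs + 1 + 1) := by
            rw [hdrop, bGo_false]
          rw [htail] at *
          simp only [if_neg hc, if_neg hn, if_true]
          rw [show i + 1 + runLen true xs + 1 = i + runLen true xs + 1 + 1 by omega, hrec]
          simp [Nat.add_assoc, Nat.add_comm, Nat.add_left_comm]

-- ===== VERDICT (by name: the statement is the Claim_ definition above) =====
theorem get_work_ranges_spec : Claim_equal_get_work_ranges := by
  intro ws _
  show get_work_ranges ws = get_work_ranges_alt ws
  unfold get_work_ranges get_work_ranges_alt
  rw [aGo_none_fuel ws.length ws le_rfl 0]
  simp
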